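-- pv_equiv track=rewrite | github.com/stillsw/playzone | interesting algorithms/python/assignments from algorithms courses/w2_asgn2_stefano_schiavi.py | bitmasks
-- ===== SOURCE A (Python) =====
-- def bitmasks(n, dist):
--     """Returns list of numbers that XORed with any integer
--        will give another integer within given hamming distance
--        'dist' away
--     n : an integer indicating the number of bits
--     dist : Hamming distance
--     """
--     if dist < n:
--         if dist > 0:
--             for x in bitmasks(n - 1, dist - 1):
--                 yield (1 << (n - 1)) + x
--             for x in bitmasks(n - 1, dist):
--                 yield x
--         else:
--             yield 0
--     else:
--         yield (1 << n) - 1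
-- ===== SOURCE B (Python) =====
-- def bitmasks(n, dist):
--     """Same result as A, computed bottom-up: a DP table rows[k] holding,
--     after processing bits 0..b-1, the k-bit-popcount masks in ascending
--     order; the answer is rows[dist] reversed."""
--     if dist >= n:
--         return [(1 << n) - 1]
--     if dist < 0:
--         return [0]
--     rows = [[0]] + [[] for _ in range(dist)]
--     for b in range(n):
--         rows = rows[:1] + [cur + [(1 << b) + m for m in prev]
--                            for prev, cur in zip(rows, rows[1:])]
--     return rows[dist][::-1]
-- ===== Notes on version B (the rewrite author's own statement) =====
-- stated objective: alternative
-- what changed: A enumerates the masks with a top-down recursive generator over the highest bit; B builds a bottom-up dynamic-programming table rows[k] of the k-popcount masks over bits 0..n-1 (ascending) and returns rows[dist] reversed.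
import Mathlib
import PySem

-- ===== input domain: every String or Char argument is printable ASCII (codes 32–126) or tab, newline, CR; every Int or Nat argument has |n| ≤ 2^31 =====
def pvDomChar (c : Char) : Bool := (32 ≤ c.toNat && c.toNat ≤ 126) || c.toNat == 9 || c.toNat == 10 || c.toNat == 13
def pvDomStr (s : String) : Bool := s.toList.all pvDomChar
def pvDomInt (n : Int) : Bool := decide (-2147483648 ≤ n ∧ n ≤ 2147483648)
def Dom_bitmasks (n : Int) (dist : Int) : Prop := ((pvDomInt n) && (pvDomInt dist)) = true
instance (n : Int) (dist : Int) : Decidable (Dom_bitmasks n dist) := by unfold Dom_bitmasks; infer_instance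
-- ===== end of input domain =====

-- B replaces A's top-down recursive generator by a bottom-up DP table of the
-- k-popcount masks; same values, no speed claim.

-- ===== PORT A =====
-- Transliteration of A (the generator's yielded sequence, as a list).
-- 1 << k is ported as 2 ^ k.toNat, exact for k ≥ 0; for k < 0 Python raises
-- (excluded by Pre_bitmasks).
def bitmasks (n : Int) (dist : Int) : List Int :=
  if _h1 : dist < n then
    if _h2 : dist > 0 then
      ((bitmasks (n - 1) (dist - 1)).map (fun x => 2 ^ (n - 1).toNat + x))
        ++ bitmasks (n - 1) dist
    else [0]
  else [2 ^ n.toNat - 1]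
termination_by n.toNat
decreasing_by all_goals omega

-- ===== PORT B =====
-- Transliteration of Source B: guards, then the DP table over bits 0..n-1
-- (rows[:1] = take 1, zip(rows, rows[1:]) = rows.zip rows.tail, [::-1] = reverse).
def bitmasks_alt (n : Int) (dist : Int) : List Int :=
  if dist ≥ n then [2 ^ n.toNat - 1]
  else if dist < 0 then [0]
  else
    let rows0 : List (List Int) := [[0]] ++ List.replicate dist.toNat []
    let rows := (PySem.List.pyRange 0 n 1).foldl
      (fun rows b =>
        rows.take 1 ++ (rows.zip rows.tail).map
          (fun pc => pc.2 ++ pc.1.map (fun m => 2 ^ b.toNat + m))) rows0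
    (rows.getD dist.toNat []).reverse

-- ===== PRECONDITION & SPEC =====
-- A raises ValueError (negative shift 1 << n) exactly when n < 0 and dist ≥ n;
-- B raises there too; Pre_ excludes exactly those inputs and nothing else.
def Pre_bitmasks (n : Int) (dist : Int) : Prop := 0 ≤ n ∨ dist < n
instance (n : Int) (dist : Int) : Decidable (Pre_bitmasks n dist) := by
  unfold Pre_bitmasks; infer_instance

def pvWitness_bitmasks : Int × Int := (4, 2)

def Spec_bitmasks (n : Int) (dist : Int) (out : List Int) : Prop := out = bitmasks_alt n dist
instance (n : Int) (dist : Int) (out : List Int) : Decidable (Spec_bitmasks n dist out) := by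
  unfold Spec_bitmasks; infer_instance

-- ===== CLAIM (what is proved, stated in full; the proofs are below) =====
def Claim_equal_bitmasks : Prop := ∀ (n : Int) (dist : Int), Dom_bitmasks n dist → Pre_bitmasks n dist → Spec_bitmasks n dist (bitmasks n dist)

-- ===== LEMMAS AND PROOFS =====

-- Specification list: asc b k = the k-popcount masks on b bits, ascending.
def asc : Nat → Nat → List Int
  | _, 0 => [0]
  | 0, _ + 1 => []
  | b + 1, k + 1 => asc b (k + 1) ++ (asc b k).map (fun m => 2 ^ b + m)

theorem asc_gt : ∀ (b k : Nat), b < k → asc b k = [] := by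
  intro b
  induction b with
  | zero => intro k hk; cases k with
    | zero => omega
    | succ k => rfl
  | succ b ih =>
    intro k hk
    cases k with
    | zero => omega
    | succ k =>
      rw [asc.eq_def]
      simp only []
      rw [ih (k + 1) (by omega), ih k (by omega)]
      simp

theorem asc_self : ∀ (b : Nat), asc b b = [2 ^ b - 1] := by
  intro b
  induction b with
  | zero => rfl
  | succ b ih =>
    simp [asc, asc_gt b (b + 1) (by omega), ih]
    ring

-- A produces asc (reversed).
theorem bitmasks_eq_asc : ∀ (N D : Nat), D ≤ N →
    bitmasks (N : Int) (D : Int) = (asc N D).reverse := by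
  intro N
  induction N with
  | zero =>
    intro D hD
    interval_cases D
    rw [bitmasks]
    norm_num [asc]
  | succ N ih =>
    intro D hD
    rcases Nat.lt_or_ge D (N + 1) with hlt | hge
    · cases D with
      | zero =>
        rw [bitmasks]
        rw [dif_pos (by exact_mod_cast hlt)]
        norm_num [asc]
      | succ D' =>
        rw [bitmasks]
        rw [dif_pos (by exact_mod_cast hlt), dif_pos (by positivity)]
        have e1 : ((N : Int) + 1 - 1) = (N : Int) := by ring
        have e2 : ((D' : Int) + 1 - 1) = (D' : Int) := by ring
        have h1 := ih D' (by omega)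
        have h2 := ih (D' + 1) (by omega)
        push_cast at h1 h2 ⊢
        rw [e1, e2, h1, h2]
        simp [asc, List.reverse_append, Int.toNat_natCast]
    · have hDN : D = N + 1 := by omega
      subst hDN
      rw [bitmasks]
      rw [dif_neg (by push_cast; omega)]
      simp [asc_self]

-- rowsList b d : the DP table after processing bits 0..b-1.
def rowsList (b d : Nat) : List (List Int) := (List.range (d + 1)).map (asc b)

theorem zip_append_left {α β : Type} : ∀ (l1 : List α) (l2 : List β) (extra : List α),
    l2.length ≤ l1.length → (l1 ++ extra).zip l2 = l1.zip l2 := by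
  intro l1
  induction l1 with
  | nil => intro l2 extra h; simp at h; simp [h]
  | cons a l1 ih =>
    intro l2 extra h
    cases l2 with
    | nil => simp
    | cons b l2 =>
      have := ih l2 extra (by simpa using h)
      simp [List.zip] at this ⊢
      exact this

theorem rowsList_zero (d : Nat) : rowsList 0 d = [[0]] ++ List.replicate d [] := by
  unfold rowsList
  induction d with
  | zero => rfl
  | succ d ih =>
    rw [List.range_succ, List.map_append, ih]
    simp [asc_gt 0 (d + 1) (by omega), List.replicate_succ']

theorem step_rowsList (b d : Nat) :
    (rowsList b d).take 1 ++ ((rowsList b d).zip (rowsList b d).tail).map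
      (fun pc => pc.2 ++ pc.1.map (fun m => 2 ^ b + m)) = rowsList (b + 1) d := by
  have hcons : rowsList b d = asc b 0 :: (List.range d).map (fun i => asc b (i + 1)) := by
    unfold rowsList
    rw [List.range_succ_eq_map]
    simp [Function.comp_def]
  have htail : (rowsList b d).tail = (List.range d).map (fun i => asc b (i + 1)) := by
    rw [hcons]; rfl
  have hsplit : rowsList b d
      = (List.range d).map (asc b) ++ [asc b d] := by
    unfold rowsList
    rw [List.range_succ, List.map_append]
    rfl
  have hzip : (rowsList b d).zip (rowsList b d).tail
      = (List.range d).map (fun i => (asc b i, asc b (i + 1))) := by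
    rw [htail, hsplit, zip_append_left _ _ _ (by simp),
      List.zip_map']
  rw [hzip, hcons]
  unfold rowsList
  rw [List.range_succ_eq_map]
  simp [List.map_map, Function.comp_def, asc]

theorem fold_rowsList (d : Nat) : ∀ (N : Nat),
    (PySem.List.pyRange 0 (N : Int) 1).foldl
      (fun rows (b : Int) =>
        rows.take 1 ++ (rows.zip rows.tail).map
          (fun pc => pc.2 ++ pc.1.map (fun m => 2 ^ b.toNat + m)))
      (rowsList 0 d) = rowsList N d := by
  intro N
  induction N with
  | zero => simp [PySem.List.pyRange_one_eq_nil]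
  | succ N ih =>
    have : ((N : Int) + 1) = ((N + 1 : Nat) : Int) := by push_cast; ring
    rw [← this, PySem.List.pyRange_one_succ_right (by positivity), List.foldl_append, ih]
    simp only [List.foldl_cons, List.foldl_nil, Int.toNat_natCast]
    exact step_rowsList N d

theorem getD_rowsList (b d : Nat) : (rowsList b d).getD d [] = asc b d := by
  unfold rowsList
  rw [List.getD_eq_getElem?_getD]
  simp

theorem bitmasks_alt_eq_asc (N D : Nat) (h : D < N) :
    bitmasks_alt (N : Int) (D : Int) = (asc N D).reverse := by
  unfold bitmasks_alt
  rw [if_neg (by omega), if_neg (by omega)]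
  simp only [Int.toNat_natCast]
  rw [← rowsList_zero, fold_rowsList, getD_rowsList]

-- ===== VERDICT (by name: the statement is the Claim_ definition above) =====
theorem bitmasks_spec : Claim_equal_bitmasks := by
  intro n dist _ hpre
  unfold Spec_bitmasks
  rcases lt_or_ge dist n with hlt | hge
  · rcases lt_or_ge dist 0 with hneg | hpos
    · -- dist < 0: both return [0]
      rw [bitmasks, dif_pos hlt, dif_neg (by omega)]
      unfold bitmasks_alt
      rw [if_neg (by omega), if_pos hneg]
    · -- 0 ≤ dist < n
      have hn : n = (n.toNat : Int) := (Int.toNat_of_nonneg (by omega)).symm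
      have hd : dist = (dist.toNat : Int) := (Int.toNat_of_nonneg hpos).symm
      rw [hn, hd, bitmasks_eq_asc _ _ (by omega), bitmasks_alt_eq_asc _ _ (by omega)]
  · -- dist ≥ n (and 0 ≤ n from Pre_): both return [2^n - 1]
    rw [bitmasks, dif_neg (by omega)]
    unfold bitmasks_alt
    rw [if_pos hge]
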